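-- pv_equiv track=rewrite | github.com/fernand0/err-buffer | buffer.py | getIniKey
-- ===== SOURCE A (Python) =====
-- def getIniKey(key, myKeys, myIniKeys):
--     if key not in myKeys:
--         if key[0] not in myIniKeys:
--             iniK = key[0]
--         else:
--             i = 1
--             while (i < len(key)) and (key[i] in myIniKeys):
--                 i = i + 1
--             if i < len(key):
--                 iniK = key[i]
--             else:
--                 iniK = "j"
--                 while iniK in myIniKeys:
--                     iniK = chr(ord(iniK) + 1)
--         myKeys[key] = iniK
--     else:
--         iniK = myKeys[key]
--     myIniKeys.append(iniK)
--     pos = key.find(iniK)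
--     if pos >= 0:
--         nKey = key[:pos] + iniK.upper() + key[pos + 1:]
--     else:
--         nKey = iniK + key
--     nKey = key + "-{}".format(iniK)
--
--     return iniK, nKey
-- ===== SOURCE B (Python) =====
-- def _pick(chars, used):
--     # first character of the key not yet used as an initial
--     for c in chars:
--         if c not in used:
--             return c
--     # all used: first free code >= ord('j'), found by a sorted gap-scan
--     # over the used single-character codes instead of a trial loop
--     start = ord("j")
--     for code in sorted({ord(s) for s in used if len(s) == 1 and ord(s) >= start}):
--         if code == start:
--             start += 1
--         elif code > start:
--             break
--     return chr(start)
--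
--
-- def getIniKey(key, myKeys, myIniKeys):
--     if key in myKeys:
--         iniK = myKeys[key]
--     else:
--         iniK = _pick(key, frozenset(myIniKeys))
--         myKeys[key] = iniK
--     myIniKeys.append(iniK)
--     return iniK, "{}-{}".format(key, iniK)
-- ===== Notes on version B (the rewrite author's own statement) =====
-- stated objective: faster
-- what changed: B replaces A's head special-case plus index-based while loop with a single first-unused scan over the key's characters against a frozenset, and replaces A's chr(ord+1) trial loop by a sorted gap-scan over the set of used single-character codes >= ord('j'); A's dead find/upper nKey block is dropped.
import Mathlib
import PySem

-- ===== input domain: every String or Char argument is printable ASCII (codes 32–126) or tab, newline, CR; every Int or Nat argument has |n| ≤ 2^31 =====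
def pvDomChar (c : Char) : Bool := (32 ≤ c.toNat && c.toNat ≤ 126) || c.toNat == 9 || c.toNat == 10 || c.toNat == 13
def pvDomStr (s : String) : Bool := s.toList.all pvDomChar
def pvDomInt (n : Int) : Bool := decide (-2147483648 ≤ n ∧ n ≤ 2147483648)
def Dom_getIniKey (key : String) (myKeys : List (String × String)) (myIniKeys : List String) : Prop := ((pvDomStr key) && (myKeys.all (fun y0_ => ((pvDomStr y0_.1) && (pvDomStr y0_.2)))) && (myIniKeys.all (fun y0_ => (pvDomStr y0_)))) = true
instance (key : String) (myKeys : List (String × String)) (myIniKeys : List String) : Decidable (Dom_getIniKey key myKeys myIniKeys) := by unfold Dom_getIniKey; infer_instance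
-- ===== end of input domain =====

-- B replaces A's head special-case + index while-loop by one first-unused scan over the key, and
-- A's chr(ord+1) trial loop by a sorted gap-scan over the used single-character codes.
-- Equivalence is about the RETURN value only: both Pythons mutate myKeys/myIniKeys identically.
-- Objective: faster (set membership and one scan instead of per-character list scans; measured faster in a timing run).

-- ===== PORT A =====
-- while (i < len(key)) and (key[i] in myIniKeys): i = i + 1   — returns the final i
def getIniKey_whileA (key : List Char) (ini : List String) (i : Nat) : Nat :=
  if h : i < key.length then
    if String.ofList [key[i]] ∈ ini then getIniKey_whileA key ini (i + 1) else i
  else i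
termination_by key.length - i

-- iniK = "j"; while iniK in myIniKeys: iniK = chr(ord(iniK) + 1)   — fuel |myIniKeys|+1 is a pure
-- totality guard: each iteration needs a distinct member of myIniKeys, so the fuel never runs out
def getIniKey_jloopA (ini : List String) : Nat → Char → Char
  | 0, c => c
  | fuel + 1, c =>
    if String.ofList [c] ∈ ini then getIniKey_jloopA ini fuel (Char.ofNat (c.toNat + 1)) else c

-- the iniK computation of A (if key not in myKeys: … else: iniK = myKeys[key])
def getIniKeyA_pick (key : String) (myKeys : List (String × String)) (myIniKeys : List String) : String :=
  let d : PySem.Dict String String := PySem.Dict.mk myKeys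
  if ¬ (d.contains key = true) then
    match key.toList with
    | [] => ""          -- key[0] raises IndexError here; excluded by Pre_getIniKey
    | c0 :: _ =>
      if ¬ (String.ofList [c0] ∈ myIniKeys) then String.ofList [c0]
      else
        let i := getIniKey_whileA key.toList myIniKeys 1
        if hi : i < key.toList.length then String.ofList [key.toList[i]]
        else String.ofList [getIniKey_jloopA myIniKeys (myIniKeys.length + 1) 'j']
  else ((PySem.Dict.mk myKeys).get? key).getD ""

def getIniKey (key : String) (myKeys : List (String × String)) (myIniKeys : List String) : String × String :=
  let iniK := getIniKeyA_pick key myKeys myIniKeys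
  -- dead code of A, kept for faithfulness: nKey is computed and then unconditionally overwritten
  let _pos : Int := PySem.Str.find key iniK
  let _nKey : String :=
    if _pos ≥ 0 then
      String.ofList (PySem.Chars.slice key.toList none (some _pos) ++
        (PySem.Str.upper iniK).toList ++ PySem.Chars.slice key.toList (some (_pos + 1)) none)
    else String.ofList (iniK.toList ++ key.toList)
  (iniK, String.ofList (key.toList ++ '-' :: iniK.toList))

-- ===== PORT B =====
-- sorted({ord(s) for s in used if len(s) == 1 and ord(s) >= ord('j')})
def getIniKeyB_codes (used : PySem.Set String) : List Nat :=
  PySem.List.sorted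
    (PySem.Set.ofList (used.filterMap (fun s =>
      match s.toList with
      | [c] => if 106 ≤ c.toNat then some c.toNat else none
      | _ => none)))
    (fun x => x) false

-- for code in codes: if code == start: start += 1 elif code > start: break   — returns final start
def getIniKeyB_gap : List Nat → Nat → Nat
  | [], start => start
  | code :: rest, start =>
    if code = start then getIniKeyB_gap rest (start + 1)
    else if code > start then start
    else getIniKeyB_gap rest start

-- _pick(chars, used): 'for c in chars: if c not in used: return c' as structural recursion;
-- the gap-scan fallback when the loop falls through
def getIniKeyB_pick (used : PySem.Set String) : List Char → String
  | [] => String.ofList [Char.ofNat (getIniKeyB_gap (getIniKeyB_codes used) 106)]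
  | c :: rest =>
    if ¬ (PySem.Set.contains used (String.ofList [c]) = true) then String.ofList [c]
    else getIniKeyB_pick used rest

def getIniKey_alt (key : String) (myKeys : List (String × String)) (myIniKeys : List String) : String × String :=
  let d : PySem.Dict String String := PySem.Dict.mk myKeys
  let iniK :=
    if d.contains key = true then (d.get? key).getD ""
    else getIniKeyB_pick (PySem.Set.ofList myIniKeys) key.toList
  (iniK, String.ofList (key.toList ++ '-' :: iniK.toList))

-- ===== PRECONDITION & SPEC =====
-- Pre_ excludes only the inputs where A raises IndexError: an empty key that is not already cached.
def Pre_getIniKey (key : String) (myKeys : List (String × String)) (myIniKeys : List String) : Prop :=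
  key.toList ≠ [] ∨ key ∈ myKeys.map Prod.fst
instance (key : String) (myKeys : List (String × String)) (myIniKeys : List String) : Decidable (Pre_getIniKey key myKeys myIniKeys) := by unfold Pre_getIniKey; infer_instance

def pvWitness_getIniKey : String × (List (String × String)) × List String :=
  ("beta", [("alpha", "a")], ["a", "b"])

def Spec_getIniKey (key : String) (myKeys : List (String × String)) (myIniKeys : List String) (out : String × String) : Prop := out = getIniKey_alt key myKeys myIniKeys
instance (key : String) (myKeys : List (String × String)) (myIniKeys : List String) (out : String × String) : Decidable (Spec_getIniKey key myKeys myIniKeys out) := by unfold Spec_getIniKey; infer_instance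

-- ===== CLAIM (what is proved, stated in full; the proofs are below) =====
def Claim_equal_getIniKey : Prop := ∀ (key : String) (myKeys : List (String × String)) (myIniKeys : List String), Dom_getIniKey key myKeys myIniKeys → Pre_getIniKey key myKeys myIniKeys → Spec_getIniKey key myKeys myIniKeys (getIniKey key myKeys myIniKeys)

-- ===== LEMMAS AND PROOFS =====

-- B's recursive scan is the find? of the first unused character (or the gap-scan fallback)
theorem pickB_eq_find (used : PySem.Set String) (l : List Char) :
    getIniKeyB_pick used l =
      match l.find? (fun c => !(PySem.Set.contains used (String.ofList [c]))) with
      | some c => String.ofList [c]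
      | none => String.ofList [Char.ofNat (getIniKeyB_gap (getIniKeyB_codes used) 106)] := by
  induction l with
  | nil => rfl
  | cons c rest ih =>
    rw [getIniKeyB_pick]
    by_cases hm : PySem.Set.contains used (String.ofList [c]) = true
    · have hmem : String.ofList [c] ∈ used := (PySem.Set.contains_iff _ _).mp hm
      rw [List.find?_cons_of_neg (by simp [hmem])]
      simp only [hm, not_true_eq_false, if_false]
      exact ih
    · have hnm : String.ofList [c] ∉ used := fun h => hm ((PySem.Set.contains_iff _ _).mpr h)
      rw [List.find?_cons_of_pos (by simp [hnm])]
      rw [if_pos hm]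

-- A's index while-loop picks exactly the element find? picks on the suffix
theorem whileA_eq_find (l : List Char) (ini : List String) (i : Nat) :
    (if h : getIniKey_whileA l ini i < l.length then some l[getIniKey_whileA l ini i] else none)
      = (l.drop i).find? (fun c => !(PySem.Set.contains (PySem.Set.ofList ini) (String.ofList [c]))) := by
  by_cases h : i < l.length
  · rw [List.drop_eq_getElem_cons h]
    by_cases hm : String.ofList [l[i]] ∈ ini
    · have hmem : String.ofList [l[i]] ∈ PySem.Set.ofList ini := (PySem.Set.mem_ofList _ _).mpr hm
      rw [List.find?_cons_of_neg (by simp [hmem])]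
      rw [getIniKey_whileA]
      simp only [h, dif_pos, hm, if_true]
      exact whileA_eq_find l ini (i + 1)
    · have hnm : String.ofList [l[i]] ∉ PySem.Set.ofList ini := fun hx => hm ((PySem.Set.mem_ofList _ _).mp hx)
      rw [List.find?_cons_of_pos (by simp [hnm])]
      rw [getIniKey_whileA]
      simp only [h, dif_pos, hm, if_false]
  · have hd : l.drop i = [] := List.drop_eq_nil_of_le (le_of_not_gt h)
    rw [getIniKey_whileA]
    simp [h, hd]
termination_by l.length - i

-- membership in B's code list
theorem mem_codes_iff (ini : List String) (m : Nat) :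
    m ∈ getIniKeyB_codes (PySem.Set.ofList ini) ↔
      ∃ c : Char, String.ofList [c] ∈ ini ∧ c.toNat = m ∧ 106 ≤ m := by
  unfold getIniKeyB_codes
  rw [PySem.List.mem_sorted, PySem.Set.mem_ofList, List.mem_filterMap]
  constructor
  · rintro ⟨s, hs, hf⟩
    rw [PySem.Set.mem_ofList] at hs
    rcases hl : s.toList with _ | ⟨c, rest⟩ <;> rw [hl] at hf
    · simp at hf
    · rcases rest with _ | _
      · have hf' : (if 106 ≤ c.toNat then some c.toNat else none) = some m := hf
        by_cases h6 : 106 ≤ c.toNat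
        · rw [if_pos h6] at hf'
          obtain rfl : c.toNat = m := by simpa using hf'
          refine ⟨c, ?_, rfl, h6⟩
          have hse : s = String.ofList [c] := by rw [← hl, String.ofList_toList]
          exact hse ▸ hs
        · rw [if_neg h6] at hf'; simp at hf'
      · simp at hf
  · rintro ⟨c, hc, rfl, h6⟩
    exact ⟨String.ofList [c], (PySem.Set.mem_ofList _ _).mpr hc, by simp [h6]⟩

-- under Dom, a used initial with code ≥ 106 has code ≤ 126
theorem code_le_of_dom (ini : List String) (hD : ini.all pvDomStr = true)
    (c : Char) (hc : String.ofList [c] ∈ ini) (h6 : 106 ≤ c.toNat) : c.toNat ≤ 126 := by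
  rw [List.all_eq_true] at hD
  have hs := hD _ hc
  have ht : (String.ofList [c]).toList = [c] := by simp
  simp only [pvDomStr, ht, List.all_cons, List.all_nil, Bool.and_true, pvDomChar] at hs
  simp only [Bool.or_eq_true, Bool.and_eq_true, decide_eq_true_eq, beq_iff_eq] at hs
  omega

-- the two fallback computations agree: A's trial loop = B's gap scan on the sorted code list
theorem jloop_eq_gap (ini : List String) (hD : ini.all pvDomStr = true) :
    ∀ (fuel : Nat) (L : List Nat) (start : Nat),
      L.Pairwise (· < ·) →
      (∀ m, m ∈ L ↔ (start ≤ m ∧ ∃ c : Char, String.ofList [c] ∈ ini ∧ c.toNat = m ∧ 106 ≤ m)) →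
      106 ≤ start → start ≤ 127 → L.length < fuel →
      getIniKey_jloopA ini fuel (Char.ofNat start) = Char.ofNat (getIniKeyB_gap L start) := by
  intro fuel
  induction fuel with
  | zero => intro L start _ _ _ _ h; omega
  | succ fuel ih =>
    intro L start hP hmem h6 h7 hlen
    have hvalid : (Char.ofNat start).toNat = start := by
      rw [Char.toNat_ofNat]
      have : start.isValidChar := Or.inl (by omega)
      simp [this]
    rw [getIniKey_jloopA]
    by_cases hin : String.ofList [Char.ofNat start] ∈ ini
    · -- start is used: it is in L, and L's head is start
      have hsm : start ∈ L := (hmem start).mpr ⟨le_refl _, Char.ofNat start, hin, hvalid, h6⟩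
      have hle : start ≤ 126 := by
        have h := code_le_of_dom ini hD (Char.ofNat start) hin (by rw [hvalid]; exact h6)
        rw [hvalid] at h; exact h
      obtain ⟨h, rest, rfl⟩ : ∃ h rest, L = h :: rest := by
        cases L with
        | nil => simp at hsm
        | cons h rest => exact ⟨h, rest, rfl⟩
      have hhead : h = start := by
        have hge : start ≤ h := ((hmem h).mp (List.mem_cons_self)).1
        rcases List.mem_cons.mp hsm with h1 | h1
        · omega
        · have := (List.pairwise_cons.mp hP).1 _ h1
          omega
      rw [if_pos hin, hvalid, hhead, getIniKeyB_gap, if_pos rfl]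
      apply ih rest (start + 1) (List.pairwise_cons.mp hP).2 ?_ (by omega) (by omega)
        (by simpa using Nat.lt_of_succ_lt_succ hlen)
      intro m
      constructor
      · intro hm
        have hml := (hmem m).mp (List.mem_cons_of_mem _ hm)
        have := (List.pairwise_cons.mp hP).1 _ hm
        exact ⟨by omega, hml.2⟩
      · rintro ⟨hm1, hm2⟩
        have hmm : m ∈ h :: rest := (hmem m).mpr ⟨by omega, hm2⟩
        rcases List.mem_cons.mp hmm with h1 | h1
        · omega
        · exact h1
    · -- start is free: A returns it; L's head (if any) exceeds start, so the gap scan stops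
      rw [if_neg hin]
      cases L with
      | nil => rfl
      | cons h rest =>
        have hh := (hmem h).mp (List.mem_cons_self)
        have hne : h ≠ start := by
          rintro rfl
          obtain ⟨_, c, hc, hct, _⟩ := hh
          have hce : c = Char.ofNat h := by
            have := congrArg Char.ofNat hct
            simpa using this
          exact hin (hce ▸ hc)
        rw [getIniKeyB_gap, if_neg hne, if_pos (by omega)]

-- B's code list is short enough for A's fuel
theorem codes_len_le (ini : List String) :
    (getIniKeyB_codes (PySem.Set.ofList ini)).length ≤ ini.length := by
  unfold getIniKeyB_codes
  calc (PySem.List.sorted _ (fun x => x) false).length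
      = _ := PySem.List.length_sorted _ _ _
    _ ≤ ((PySem.Set.ofList ini).filterMap _).length := PySem.Set.length_ofList_le _
    _ ≤ (PySem.Set.ofList ini).length := List.length_filterMap_le _ _
    _ ≤ ini.length := PySem.Set.length_ofList_le _

-- the two iniK computations agree
theorem pick_eq (key : String) (myKeys : List (String × String)) (myIniKeys : List String)
    (hDom : Dom_getIniKey key myKeys myIniKeys) (hPre : Pre_getIniKey key myKeys myIniKeys) :
    getIniKeyA_pick key myKeys myIniKeys =
      (if (PySem.Dict.mk myKeys).contains key = true then (((PySem.Dict.mk myKeys).get? key).getD "")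
       else getIniKeyB_pick (PySem.Set.ofList myIniKeys) key.toList) := by
  by_cases hc : (PySem.Dict.mk myKeys).contains key = true
  · simp [getIniKeyA_pick, hc]
  · have hkey : key.toList ≠ [] := by
      rcases hPre with h | h
      · exact h
      · exfalso
        apply hc
        simp only [PySem.Dict.contains, List.any_eq_true]
        obtain ⟨p, hp, hfst⟩ := List.mem_map.mp h
        exact ⟨p, hp, by simp [hfst]⟩
    have hIni : myIniKeys.all pvDomStr = true := by
      unfold Dom_getIniKey at hDom
      simp only [Bool.and_eq_true] at hDom
      exact hDom.2
    obtain ⟨c0, cs, hl⟩ := List.exists_cons_of_ne_nil hkey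
    rw [getIniKeyA_pick, if_pos hc, if_neg hc, pickB_eq_find]
    simp only [hl]
    by_cases h0 : String.ofList [c0] ∈ myIniKeys
    · -- head is used: B's find? skips it, A runs the while loop from index 1
      have h0s : String.ofList [c0] ∈ PySem.Set.ofList myIniKeys := (PySem.Set.mem_ofList _ _).mpr h0
      rw [List.find?_cons_of_neg (by simp [h0s])]
      rw [if_neg (not_not_intro h0)]
      have hfind := whileA_eq_find (c0 :: cs) myIniKeys 1
      have hdrop : (c0 :: cs).drop 1 = cs := rfl
      rw [hdrop] at hfind
      by_cases hw : getIniKey_whileA (c0 :: cs) myIniKeys 1 < (c0 :: cs).length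
      · rw [dif_pos hw] at hfind
        rw [dif_pos hw, ← hfind]
      · rw [dif_neg hw] at hfind
        rw [dif_neg hw, ← hfind]
        have hj : ('j' : Char) = Char.ofNat 106 := rfl
        have hPL : (getIniKeyB_codes (PySem.Set.ofList myIniKeys)).Pairwise (· < ·) := by
          unfold getIniKeyB_codes
          exact PySem.List.sorted_ofList_pairwise_lt _
        have hML : ∀ m, m ∈ getIniKeyB_codes (PySem.Set.ofList myIniKeys) ↔
            (106 ≤ m ∧ ∃ c : Char, String.ofList [c] ∈ myIniKeys ∧ c.toNat = m ∧ 106 ≤ m) := by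
          intro m
          rw [mem_codes_iff]
          constructor
          · rintro ⟨c, hc1, hc2, hc3⟩; exact ⟨hc3, c, hc1, hc2, hc3⟩
          · rintro ⟨_, c, hc1, hc2, hc3⟩; exact ⟨c, hc1, hc2, hc3⟩
        rw [hj, jloop_eq_gap myIniKeys hIni (myIniKeys.length + 1)
          (getIniKeyB_codes (PySem.Set.ofList myIniKeys)) 106 hPL hML (by omega) (by omega)
          (by have := codes_len_le myIniKeys; omega)]
    · -- head is free: both pick c0
      have h0s : String.ofList [c0] ∉ PySem.Set.ofList myIniKeys := fun hx => h0 ((PySem.Set.mem_ofList _ _).mp hx)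
      rw [List.find?_cons_of_pos (by simp [h0s])]
      rw [if_pos h0]

-- ===== VERDICT (by name: the statement is the Claim_ definition above) =====
theorem getIniKey_spec : Claim_equal_getIniKey := by
  intro key myKeys myIniKeys hDom hPre
  unfold Spec_getIniKey getIniKey getIniKey_alt
  rw [pick_eq key myKeys myIniKeys hDom hPre]
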